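-- pv_equiv track=rewrite | github.com/muonium-ai/muonledger | port/python/src/muonledger/parser.py | _find_comment_start
-- ===== SOURCE A (Python) =====
-- def _find_comment_start(text: str) -> int:
--     """Find the position of an inline comment ``;`` in amount text.
--
--     Returns -1 if no comment found. Respects quoted strings.
--     """
--     in_quote = False
--     for i, ch in enumerate(text):
--         if ch == '"':
--             in_quote = not in_quote
--         elif not in_quote and ch == ";":
--             return i
--     return -1
-- ===== SOURCE B (Python) =====
-- def _find_comment_start(text: str) -> int:
--     """Find the position of an inline comment ``;`` in amount text.
--
--     Returns -1 if no comment found. Respects quoted strings.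
--     """
--     offset = 0
--     for k, seg in enumerate(text.split('"')):
--         if k % 2 == 0:
--             j = seg.find(";")
--             if j != -1:
--                 return offset + j
--         offset += len(seg) + 1
--     return -1
-- ===== Notes on version B (the rewrite author's own statement) =====
-- stated objective: faster
-- what changed: Replaces A's per-character scan with an in_quote flag by splitting the text at quote characters and searching only even-indexed (unquoted) segments for a semicolon via str.find, tracking a running offset.
import Mathlib
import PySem

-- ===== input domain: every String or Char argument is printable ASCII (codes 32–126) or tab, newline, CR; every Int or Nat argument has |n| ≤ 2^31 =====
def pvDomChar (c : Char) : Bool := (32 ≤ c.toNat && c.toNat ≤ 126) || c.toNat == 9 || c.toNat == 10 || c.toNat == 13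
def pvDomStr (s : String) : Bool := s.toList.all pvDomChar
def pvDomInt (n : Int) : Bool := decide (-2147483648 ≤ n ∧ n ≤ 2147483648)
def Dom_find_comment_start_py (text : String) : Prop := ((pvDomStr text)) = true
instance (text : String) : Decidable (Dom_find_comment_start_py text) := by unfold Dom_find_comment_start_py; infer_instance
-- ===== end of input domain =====

-- B replaces A: instead of a per-character quote-state scan, split at quote characters and search only
-- even (unquoted) segments via find, with a running offset (measured constant-factor faster).

-- ===== PORT A =====
-- A's loop: enumerate(text) with an in_quote flag; early return on unquoted ';'.
def fcsGoA : List Char → Bool → Nat → Int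
  | [], _, _ => -1
  | c :: cs, q, i =>
    if c = '"' then fcsGoA cs (!q) (i + 1)
    else if !q && (c == ';') then (i : Int)
    else fcsGoA cs q (i + 1)

def find_comment_start_py (text : String) : Int :=
  fcsGoA text.toList false 0

-- ===== PORT B =====
-- port of Source B's text.split('"') (single-character separator)
def fcsSplitQ : List Char → List (List Char)
  | [] => [[]]
  | c :: cs =>
    match fcsSplitQ cs with
    | [] => [[]]  -- unreachable: fcsSplitQ never returns []
    | s :: rest => if c = '"' then [] :: s :: rest else (c :: s) :: rest

-- port of Source B's seg.find(";") (single-character needle; -1 if absent)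
def fcsFindSemi : List Char → Int
  | [] => -1
  | c :: s =>
    if c = ';' then 0
    else if fcsFindSemi s = -1 then -1 else fcsFindSemi s + 1

-- Source B's loop over enumerate(segments) with the running offset
def fcsGoB : List (List Char) → Nat → Nat → Int
  | [], _, _ => -1
  | seg :: rest, k, off =>
    if k % 2 = 0 then
      if fcsFindSemi seg ≠ -1 then (off : Int) + fcsFindSemi seg
      else fcsGoB rest (k + 1) (off + seg.length + 1)
    else fcsGoB rest (k + 1) (off + seg.length + 1)

def find_comment_start_py_alt (text : String) : Int :=
  fcsGoB (fcsSplitQ text.toList) 0 0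

-- ===== PRECONDITION & SPEC =====
def Spec_find_comment_start_py (text : String) (out : Int) : Prop := out = find_comment_start_py_alt text
instance (text : String) (out : Int) : Decidable (Spec_find_comment_start_py text out) := by unfold Spec_find_comment_start_py; infer_instance

-- ===== CLAIM (what is proved, stated in full; the proofs are below) =====
def Claim_equal_find_comment_start_py : Prop := ∀ (text : String), Dom_find_comment_start_py text → Spec_find_comment_start_py text (find_comment_start_py text)

-- ===== LEMMAS AND PROOFS =====

theorem fcsFindSemi_ge_neg_one : ∀ s : List Char, -1 ≤ fcsFindSemi s := by
  intro s
  induction s with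
  | nil => simp [fcsFindSemi]
  | cons c t ih =>
    simp only [fcsFindSemi]
    split_ifs <;> omega

-- absorbing one non-quote char of the head segment into the offset
theorem fcsGoB_cons (c : Char) (s : List Char) (rest : List (List Char)) (k off : Nat)
    (h : k % 2 = 0 → c ≠ ';') :
    fcsGoB ((c :: s) :: rest) k off = fcsGoB (s :: rest) k (off + 1) := by
  have hfs := fcsFindSemi_ge_neg_one s
  by_cases hk : k % 2 = 0
  · have hc := h hk
    simp only [fcsGoB, hk, if_pos, fcsFindSemi, if_neg hc, List.length_cons]
    split_ifs with h1 h2 h2 <;> first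
      | (push_cast; omega)
      | omega
      | (congr 1; omega)
  · simp only [fcsGoB, if_neg hk, List.length_cons]
    congr 1
    omega

theorem fcsParity (k : Nat) : (!decide (k % 2 = 1)) = decide ((k + 1) % 2 = 1) := by
  rcases Nat.mod_two_eq_zero_or_one k with h | h <;>
    simp [Nat.add_mod, h]

theorem fcsSplitQ_ne_nil : ∀ l : List Char, fcsSplitQ l ≠ [] := by
  intro l
  induction l with
  | nil => simp [fcsSplitQ]
  | cons c cs ih =>
    rw [fcsSplitQ]
    rcases h : fcsSplitQ cs with _ | ⟨s, rest⟩
    · exact absurd h ih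
    · by_cases hc : c = '"' <;> simp [hc]

theorem fcsMain : ∀ (l : List Char) (k i : Nat),
    fcsGoA l (decide (k % 2 = 1)) i = fcsGoB (fcsSplitQ l) k i := by
  intro l
  induction l with
  | nil =>
    intro k i
    by_cases hk : k % 2 = 0 <;> simp [fcsGoA, fcsSplitQ, fcsGoB, fcsFindSemi, hk]
  | cons c cs ih =>
    intro k i
    rcases hsp : fcsSplitQ cs with _ | ⟨s, rest⟩
    · exact absurd hsp (fcsSplitQ_ne_nil cs)
    · by_cases hc : c = '"'
      · subst hc
        rw [fcsSplitQ, hsp]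
        show fcsGoA _ _ _ = fcsGoB ([] :: s :: rest) k i
        have hnil : fcsFindSemi ([] : List Char) = -1 := rfl
        have hstep : fcsGoB ([] :: s :: rest) k i = fcsGoB (s :: rest) (k + 1) (i + 1) := by
          by_cases hk : k % 2 = 0 <;> simp [fcsGoB, hk, hnil]
        rw [hstep]
        have hih := ih (k + 1) (i + 1)
        rw [hsp] at hih
        rw [fcsGoA, if_pos rfl, fcsParity k]
        exact hih
      · rw [fcsSplitQ, hsp]
        show fcsGoA _ _ _ = fcsGoB ((if c = '"' then [] :: s :: rest else (c :: s) :: rest)) k i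
        rw [if_neg hc]
        by_cases hsemi : k % 2 = 0 ∧ c = ';'
        · obtain ⟨hk, hcs⟩ := hsemi
          have hq : decide (k % 2 = 1) = false := by simp; omega
          rw [fcsGoA, if_neg hc]
          simp only [hq, hcs]
          simp only [fcsGoB, hk, if_pos]
          rw [fcsFindSemi]
          simp
        · have h' : k % 2 = 0 → c ≠ ';' := by tauto
          rw [fcsGoB_cons c s rest k i h']
          have hA : fcsGoA (c :: cs) (decide (k % 2 = 1)) i
              = fcsGoA cs (decide (k % 2 = 1)) (i + 1) := by
            rw [fcsGoA, if_neg hc]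
            by_cases hk : k % 2 = 0
            · have hq : decide (k % 2 = 1) = false := by simp; omega
              have hcne : c ≠ ';' := h' hk
              simp [hq, hcne]
            · have hq : decide (k % 2 = 1) = true := by simp; omega
              simp [hq]
          rw [hA]
          have hih := ih k (i + 1)
          rw [hsp] at hih
          exact hih

-- ===== VERDICT (by name: the statement is the Claim_ definition above) =====
theorem find_comment_start_py_spec : Claim_equal_find_comment_start_py := by
  intro text _
  unfold Spec_find_comment_start_py find_comment_start_py find_comment_start_py_alt
  have h := fcsMain text.toList 0 0
  simpa using h
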